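-- pv_equiv track=rewrite | github.com/U88478/validator | vp.py | vp
-- ===== SOURCE A (Python) =====
-- def vp(s):
--     bn = 0
--     for i in s:
--         if i == "<":
--             bn += 1
--         elif i == ">":
--             bn -= 1
--         if bn < 0:
--             return False
--     return bn == 0
-- ===== SOURCE B (Python) =====
-- def vp(s):
--     t = "".join(c for c in s if c in "<>")
--     while "<>" in t:
--         t = t.replace("<>", "")
--     return t == ""
-- ===== Notes on version B (the rewrite author's own statement) =====
-- stated objective: alternative
-- what changed: Replaces the running-counter scan by string rewriting: keep only the bracket characters, then repeatedly delete every adjacent open-close pair via str.replace until none remains; the string is balanced iff the normal form is empty.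
import Mathlib
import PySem

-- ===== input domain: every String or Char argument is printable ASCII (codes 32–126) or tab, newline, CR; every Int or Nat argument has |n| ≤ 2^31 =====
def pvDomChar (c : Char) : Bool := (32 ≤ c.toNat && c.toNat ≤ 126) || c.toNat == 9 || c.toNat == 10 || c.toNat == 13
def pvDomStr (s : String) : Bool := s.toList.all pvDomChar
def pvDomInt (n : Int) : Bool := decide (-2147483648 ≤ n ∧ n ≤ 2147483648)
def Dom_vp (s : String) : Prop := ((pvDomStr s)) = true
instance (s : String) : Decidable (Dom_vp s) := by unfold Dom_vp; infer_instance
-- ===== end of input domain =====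

-- B replaces A's running-counter scan by string rewriting: keep the brackets, repeatedly
-- delete all adjacent open-close pairs (str.replace) until none remains, and test for the
-- empty normal form; a timing run measured B faster (C-level replace vs Python loop).

-- ===== PORT A =====
-- A's loop with early return, as structural recursion over the characters carrying bn.
def vpGo : List Char → Int → Bool
  | [], bn => bn == 0
  | c :: rest, bn =>
    let bn' := if c = '<' then bn + 1 else if c = '>' then bn - 1 else bn
    if bn' < 0 then false else vpGo rest bn'

def vp (s : String) : Bool := vpGo s.toList 0

-- ===== PORT B =====
-- t.replace("<>", ""): delete the non-overlapping "<>" occurrences, scanning left to right.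
def vpRepl : List Char → List Char
  | [] => []
  | [c] => [c]
  | c :: d :: r => if c = '<' ∧ d = '>' then vpRepl r else c :: vpRepl (d :: r)

-- '"<>" in t'
def vpHasPair : List Char → Bool
  | [] => false
  | [_] => false
  | c :: d :: r => (c = '<' && d = '>') || vpHasPair (d :: r)

-- termination of the while loop: each replace strictly shortens the string
theorem vpRepl_length_le (t : List Char) : (vpRepl t).length ≤ t.length := by
  induction t using vpRepl.induct with
  | case1 => simp [vpRepl]
  | case2 c => simp [vpRepl]
  | case3 c d r h ih => rw [vpRepl, if_pos h]; simp only [List.length_cons]; omega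
  | case4 c d r h ih =>
    rw [vpRepl, if_neg h]
    simp only [List.length_cons] at ih ⊢
    omega

theorem vpRepl_shrink (t : List Char) (h : vpHasPair t = true) :
    (vpRepl t).length < t.length := by
  induction t using vpRepl.induct with
  | case1 => simp [vpHasPair] at h
  | case2 c => simp [vpHasPair] at h
  | case3 c d r hp ih =>
    have := vpRepl_length_le r
    rw [vpRepl, if_pos hp]; simp only [List.length_cons]; omega
  | case4 c d r hp ih =>
    simp only [vpHasPair, Bool.or_eq_true, Bool.and_eq_true, decide_eq_true_eq] at h
    rcases h with ⟨h1, h2⟩ | h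
    · exact absurd ⟨h1, h2⟩ hp
    · have := ih h
      rw [vpRepl, if_neg hp]
      simp only [List.length_cons] at this ⊢
      omega

-- 'while "<>" in t: t = t.replace("<>", "")' followed by 'return t == ""'
def vpLoop (t : List Char) : Bool :=
  if vpHasPair t then vpLoop (vpRepl t) else t.isEmpty
termination_by t.length
decreasing_by exact vpRepl_shrink _ (by assumption)

def vp_alt (s : String) : Bool :=
  vpLoop (s.toList.filter (fun c => c = '<' || c = '>'))

-- ===== PRECONDITION & SPEC =====
def Spec_vp (s : String) (out : Bool) : Prop := out = vp_alt s
instance (s : String) (out : Bool) : Decidable (Spec_vp s out) := by unfold Spec_vp; infer_instance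

-- ===== CLAIM (what is proved, stated in full; the proofs are below) =====
def Claim_equal_vp : Prop := ∀ (s : String), Dom_vp s → Spec_vp s (vp s)

-- ===== LEMMAS AND PROOFS =====

-- deleting one pass of "<>" pairs does not change A's verdict (for nonnegative counters)
theorem vpGo_repl (t : List Char) : ∀ bn : Int, 0 ≤ bn → vpGo (vpRepl t) bn = vpGo t bn := by
  induction t using vpRepl.induct with
  | case1 => intro bn h; rfl
  | case2 c => intro bn h; rfl
  | case3 c d r hp ih =>
    intro bn h
    obtain ⟨hc, hd⟩ := hp
    subst hc; subst hd
    rw [vpRepl, if_pos ⟨rfl, rfl⟩, ih bn h]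
    show vpGo r bn = vpGo ('<' :: '>' :: r) bn
    have h1 : ¬ (bn + 1 < 0) := by omega
    have h2 : ('>' : Char) ≠ '<' := by decide
    have h4 : ¬ (bn < 0) := by omega
    simp [vpGo, h1, h2, h4]
  | case4 c d r hp ih =>
    intro bn h
    rw [vpRepl, if_neg hp]
    show vpGo (c :: vpRepl (d :: r)) bn = vpGo (c :: d :: r) bn
    simp only [vpGo]
    by_cases hneg : (if c = '<' then bn + 1 else if c = '>' then bn - 1 else bn) < 0
    · simp [hneg]
    · have hge : 0 ≤ (if c = '<' then bn + 1 else if c = '>' then bn - 1 else bn) := by omega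
      simp only [if_neg hneg]
      exact ih _ hge

-- non-bracket characters are no-ops for A (when the counter is nonnegative)
theorem vpGo_filter (l : List Char) : ∀ bn : Int, 0 ≤ bn →
    vpGo (l.filter (fun c => c = '<' || c = '>')) bn = vpGo l bn := by
  induction l with
  | nil => intro bn h; rfl
  | cons c r ih =>
    intro bn h
    by_cases hc : (c = '<' ∨ c = '>')
    · have hf : (fun c => decide (c = '<') || decide (c = '>')) c = true := by
        simp [hc]
      rw [List.filter_cons]
      simp only [hf, if_true]
      simp only [vpGo]
      by_cases hneg : (if c = '<' then bn + 1 else if c = '>' then bn - 1 else bn) < 0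
      · simp [hneg]
      · simp only [if_neg hneg]
        exact ih _ (by omega)
    · push Not at hc
      have hf : (fun c => decide (c = '<') || decide (c = '>')) c = false := by
        simp [hc.1, hc.2]
      rw [List.filter_cons]
      simp only [hf, if_false, Bool.false_eq_true]
      have h1 : c ≠ '<' := hc.1
      have h2 : c ≠ '>' := hc.2
      simp only [vpGo, if_neg h1, if_neg h2]
      rw [if_neg (by omega)]
      exact ih bn h

-- vpRepl only keeps characters of its input
theorem vpRepl_subset (t : List Char) : ∀ c ∈ vpRepl t, c ∈ t := by
  induction t using vpRepl.induct with
  | case1 => intro c hc; simp [vpRepl] at hc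
  | case2 c => intro x hx; simpa [vpRepl] using hx
  | case3 c d r hp ih =>
    intro x hx
    rw [vpRepl, if_pos hp] at hx
    exact List.mem_cons_of_mem _ (List.mem_cons_of_mem _ (ih x hx))
  | case4 c d r hp ih =>
    intro x hx
    rw [vpRepl, if_neg hp] at hx
    rcases List.mem_cons.mp hx with h | h
    · exact h ▸ List.mem_cons_self
    · exact List.mem_cons_of_mem _ (ih x h)

-- a bracket-only string with no "<>" pair is  >…> <…<
theorem nopair_shape (t : List Char) (hb : ∀ c ∈ t, c = '<' ∨ c = '>')
    (hp : vpHasPair t = false) :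
    ∃ a b : Nat, t = List.replicate a '>' ++ List.replicate b '<' := by
  induction t with
  | nil => exact ⟨0, 0, rfl⟩
  | cons c r ih =>
    have hbr : ∀ x ∈ r, x = '<' ∨ x = '>' := fun x hx => hb x (List.mem_cons_of_mem _ hx)
    have hpr : vpHasPair r = false := by
      cases r with
      | nil => rfl
      | cons d r' =>
        simp only [vpHasPair, Bool.or_eq_false_iff] at hp
        exact hp.2
    obtain ⟨a, b, hab⟩ := ih hbr hpr
    rcases hb c List.mem_cons_self with hc | hc
    · -- c = '<' : since no pair, r cannot start with '>', so a = 0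
      subst hc
      have ha : a = 0 := by
        by_contra ha
        cases a with
        | zero => exact ha rfl
        | succ a' =>
          have : r = '>' :: (List.replicate a' '>' ++ List.replicate b '<') := by
            simpa [List.replicate_succ] using hab
          rw [this] at hp
          simp [vpHasPair] at hp
      subst ha
      simp only [List.replicate_zero, List.nil_append] at hab
      exact ⟨0, b + 1, by simp [hab, List.replicate_succ]⟩
    · subst hc
      exact ⟨a + 1, b, by simp [hab, List.replicate_succ]⟩

-- A on a run of '<' only
theorem vpGo_replicate_lt (b : Nat) : ∀ bn : Int, 0 ≤ bn →
    vpGo (List.replicate b '<') bn = (bn + (b : Int) == 0) := by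
  induction b with
  | zero => intro bn h; simp [vpGo]
  | succ b' ih =>
    intro bn h
    rw [List.replicate_succ]
    have hneg : ¬ (bn + 1 < 0) := by omega
    simp only [vpGo]
    simp only [reduceIte, hneg, if_false]
    rw [ih (bn + 1) (by omega)]
    congr 1
    push_cast
    ring

-- on a no-pair bracket-only string, A accepts iff the string is empty
theorem vpGo_nopair (t : List Char) (hb : ∀ c ∈ t, c = '<' ∨ c = '>')
    (hp : vpHasPair t = false) : vpGo t 0 = t.isEmpty := by
  obtain ⟨a, b, hab⟩ := nopair_shape t hb hp
  subst hab
  cases a with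
  | zero =>
    simp only [List.replicate_zero, List.nil_append]
    rw [vpGo_replicate_lt b 0 le_rfl]
    cases b with
    | zero => simp
    | succ b' =>
      simp only [List.isEmpty, List.replicate_succ]
      have h0 : ((b' : Int) + 1) ≠ 0 := by omega
      simp [h0]
  | succ a' =>
    rw [List.replicate_succ]
    simp only [List.cons_append]
    have h1 : ('>' : Char) ≠ '<' := by decide
    simp [vpGo, h1, List.isEmpty]

-- the rewriting loop agrees with A's scan on bracket-only strings
theorem vpLoop_eq (n : Nat) : ∀ t : List Char, t.length ≤ n →
    (∀ c ∈ t, c = '<' ∨ c = '>') → vpLoop t = vpGo t 0 := by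
  induction n with
  | zero =>
    intro t hl hb
    have ht : t = [] := List.eq_nil_of_length_eq_zero (Nat.le_zero.mp hl)
    subst ht
    rw [vpLoop]
    rfl
  | succ n' ih =>
    intro t hl hb
    rw [vpLoop]
    by_cases hp : vpHasPair t = true
    · rw [if_pos hp]
      have hlen := vpRepl_shrink t hp
      have hb' : ∀ c ∈ vpRepl t, c = '<' ∨ c = '>' := fun c hc => hb c (vpRepl_subset t c hc)
      rw [ih (vpRepl t) (by omega) hb', vpGo_repl t 0 le_rfl]
    · rw [if_neg hp]
      exact (vpGo_nopair t hb (Bool.not_eq_true _ ▸ eq_false_of_ne_true hp)).symm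

theorem vp_eq_alt (s : String) : vp s = vp_alt s := by
  show vpGo s.toList 0 = vpLoop (s.toList.filter (fun c => c = '<' || c = '>'))
  have hb : ∀ c ∈ s.toList.filter (fun c => c = '<' || c = '>'), c = '<' ∨ c = '>' := by
    intro c hc
    have hm := (List.mem_filter.mp hc).2
    simp at hm
    exact hm
  rw [vpLoop_eq (s.toList.filter (fun c => c = '<' || c = '>')).length _ le_rfl hb]
  exact (vpGo_filter s.toList 0 le_rfl).symm

-- ===== VERDICT (by name: the statement is the Claim_ definition above) =====
theorem vp_spec : Claim_equal_vp := by
  intro s _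
  exact vp_eq_alt s
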